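-- pv_equiv track=rewrite | github.com/IrinaShcherbakova/Leetcode-Python | leetcode/easy/kWeakestRows.py | numberOfOnes
-- ===== SOURCE A (Python) =====
-- from typing import List
--
-- def numberOfOnes(row: List[int]) -> int:
--     res = 0
--     for num in row:
--         if num == 1:
--             res += 1
--         else:
--             return res
--     return res
-- ===== SOURCE B (Python) =====
-- from typing import List
--
-- def numberOfOnes(row: List[int]) -> int:
--     # Right-to-left fold with reset: the counter restarts at every non-1,
--     # so after the whole pass it holds the length of the leading-1s prefix.
--     res = 0
--     for num in reversed(row):
--         res = res + 1 if num == 1 else 0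
--     return res
-- ===== Notes on version B (the rewrite author's own statement) =====
-- stated objective: alternative
-- what changed: A scans forward with an early return at the first non-1; B folds over the list right-to-left with a counter that resets to 0 at every non-1, whose final value is the leading-ones count -- no early exit, opposite traversal order.
import Mathlib
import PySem

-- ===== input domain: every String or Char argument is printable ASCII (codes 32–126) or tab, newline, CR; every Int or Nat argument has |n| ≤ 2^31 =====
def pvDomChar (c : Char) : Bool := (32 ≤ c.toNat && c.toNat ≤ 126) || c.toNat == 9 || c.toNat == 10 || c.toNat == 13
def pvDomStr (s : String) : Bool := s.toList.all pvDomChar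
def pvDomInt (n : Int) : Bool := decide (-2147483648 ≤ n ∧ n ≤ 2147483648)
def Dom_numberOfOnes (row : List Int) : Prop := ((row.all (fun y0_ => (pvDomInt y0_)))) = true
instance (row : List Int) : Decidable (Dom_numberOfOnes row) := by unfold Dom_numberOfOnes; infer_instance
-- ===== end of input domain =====

-- B traverses right-to-left with a resetting counter instead of A's forward scan with early return (alternative; same cost).

-- ===== PORT A =====
-- loop with accumulator res; early return at the first non-1 element
def numberOfOnesGo : List Int → Int → Int
  | [], res => res
  | num :: t, res => if num == 1 then numberOfOnesGo t (res + 1) else res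

def numberOfOnes (row : List Int) : Int := numberOfOnesGo row 0

-- ===== PORT B =====
-- for num in reversed(row): res = res + 1 if num == 1 else 0
def numberOfOnes_alt (row : List Int) : Int :=
  row.reverse.foldl (fun res num => if num == 1 then res + 1 else 0) 0

-- ===== PRECONDITION & SPEC =====
def Spec_numberOfOnes (row : List Int) (out : Int) : Prop := out = numberOfOnes_alt row
instance (row : List Int) (out : Int) : Decidable (Spec_numberOfOnes row out) := by unfold Spec_numberOfOnes; infer_instance

-- ===== CLAIM (what is proved, stated in full; the proofs are below) =====
def Claim_equal_numberOfOnes : Prop := ∀ (row : List Int), Dom_numberOfOnes row → Spec_numberOfOnes row (numberOfOnes row)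

-- ===== LEMMAS AND PROOFS =====

-- ===== VERDICT (by name: the statement is the Claim_ definition above) =====
-- B's reversed fold equals a right fold over the original list
theorem alt_eq_foldr (row : List Int) :
    numberOfOnes_alt row = row.foldr (fun num res => if num == 1 then res + 1 else 0) 0 := by
  unfold numberOfOnes_alt
  rw [List.foldl_reverse]

-- A's accumulator loop, started at res, adds the right-fold value
theorem go_eq (row : List Int) : ∀ res : Int,
    numberOfOnesGo row res = res + row.foldr (fun num res => if num == 1 then res + 1 else 0) 0 := by
  induction row with
  | nil => intro res; simp [numberOfOnesGo]
  | cons n t ih =>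
    intro res
    by_cases h : n = 1
    · subst h
      simp only [numberOfOnesGo, beq_self_eq_true, if_true, List.foldr_cons, ih]
      ring
    · simp [numberOfOnesGo, h]

-- ===== VERDICT (by name: the statement is the Claim_ definition above) =====
theorem numberOfOnes_spec : Claim_equal_numberOfOnes := by
  intro row _
  unfold Spec_numberOfOnes numberOfOnes
  rw [go_eq, alt_eq_foldr]
  ring
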